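-- pv_equiv track=rewrite | github.com/GogL0L/MM5016 | Labs/Lab6/lab6.py | vector_sum
-- ===== SOURCE A (Python) =====
-- def vector_add(v,u):
--     """ Add vectors componentwise. """
--     n = len(v)
--     return [v[k] + u[k] for k in range(n)]
--
-- def vector_sum(list_of_vectors, size=1):
--     """ Returns the sum of the list. """
--     n = size
--     zero = [0 for i in range(n)]
--     if list_of_vectors == []:
--         return zero
--     else:
--         n = len(list_of_vectors[0])
--         zero = [0 for i in range(n)]
--         return vector_add(list_of_vectors[0],
--                           vector_sum(list_of_vectors[1:], size=n))
-- ===== SOURCE B (Python) =====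
-- def vector_sum(list_of_vectors, size=1):
--     """ Returns the sum of the list (iterative right-to-left fold). """
--     if list_of_vectors == []:
--         return [0 for i in range(size)]
--     partial = [0] * len(list_of_vectors[-1])
--     for v in reversed(list_of_vectors):
--         partial = [v[k] + partial[k] for k in range(len(v))]
--     return partial
-- ===== Notes on version B (the rewrite author's own statement) =====
-- stated objective: simpler
-- what changed: Replaced A's recursion with a vector_add helper and list slicing by a single iterative right-to-left fold: one loop over reversed(list_of_vectors) updating a running partial sum, no helper and no O(n) slice copies.
import Mathlib
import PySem

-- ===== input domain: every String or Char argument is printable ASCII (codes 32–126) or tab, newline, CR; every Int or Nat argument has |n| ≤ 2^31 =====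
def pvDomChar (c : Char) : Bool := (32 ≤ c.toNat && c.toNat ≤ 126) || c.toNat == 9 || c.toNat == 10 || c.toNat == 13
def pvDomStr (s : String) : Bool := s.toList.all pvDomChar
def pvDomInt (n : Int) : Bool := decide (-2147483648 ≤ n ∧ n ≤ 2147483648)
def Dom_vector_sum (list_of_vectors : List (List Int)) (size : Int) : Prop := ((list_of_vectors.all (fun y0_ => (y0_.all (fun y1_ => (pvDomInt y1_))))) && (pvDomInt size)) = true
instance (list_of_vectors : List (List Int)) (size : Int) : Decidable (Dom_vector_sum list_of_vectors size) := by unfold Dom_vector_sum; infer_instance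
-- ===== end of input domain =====

-- B replaces A's recursion (with its vector_add helper and list slicing) by one
-- iterative right-to-left fold over the list; same values, same cost, plainer shape.
-- ===== PORT A =====
def vector_add (v u : List Int) : List Int :=
  (List.range v.length).map (fun k => PySem.List.pyGetD v (k : Int) 0 + PySem.List.pyGetD u (k : Int) 0)

def vector_sum (list_of_vectors : List (List Int)) (size : Int) : List Int :=
  match list_of_vectors with
  | [] => List.replicate size.toNat 0
  | v :: rest => vector_add v (vector_sum rest (v.length : Int))

-- ===== PORT B =====
def vector_sum_alt (list_of_vectors : List (List Int)) (size : Int) : List Int :=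
  if list_of_vectors = [] then List.replicate size.toNat 0
  else
    list_of_vectors.reverse.foldl
      (fun partial_ v =>
        (List.range v.length).map
          (fun k => PySem.List.pyGetD v (k : Int) 0 + PySem.List.pyGetD partial_ (k : Int) 0))
      (List.replicate ((PySem.List.pyGet? list_of_vectors (-1)).getD []).length 0)

-- ===== PRECONDITION & SPEC =====
-- Pre_ excludes exactly the inputs where Python A raises IndexError: a vector longer
-- than its successor (both A and B index past the end of the accumulated sum there).
def Pre_vector_sum (list_of_vectors : List (List Int)) (size : Int) : Prop :=
  ((list_of_vectors.zip list_of_vectors.tail).all (fun p => p.1.length ≤ p.2.length)) = true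
instance (list_of_vectors : List (List Int)) (size : Int) : Decidable (Pre_vector_sum list_of_vectors size) := by unfold Pre_vector_sum; infer_instance
def pvWitness_vector_sum : List (List Int) × Int := ([[1, 2], [3, -4]], 2)

def Spec_vector_sum (list_of_vectors : List (List Int)) (size : Int) (out : List Int) : Prop := out = vector_sum_alt list_of_vectors size
instance (list_of_vectors : List (List Int)) (size : Int) (out : List Int) : Decidable (Spec_vector_sum list_of_vectors size out) := by unfold Spec_vector_sum; infer_instance

-- ===== CLAIM (what is proved, stated in full; the proofs are below) =====
def Claim_equal_vector_sum : Prop := ∀ (list_of_vectors : List (List Int)) (size : Int), Dom_vector_sum list_of_vectors size → Pre_vector_sum list_of_vectors size → Spec_vector_sum list_of_vectors size (vector_sum list_of_vectors size)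

-- ===== LEMMAS AND PROOFS =====
-- The two ports agree on ALL inputs (Pre_ is only needed for faithfulness to the
-- raising Pythons); the core is: A's recursion is B's fold over the reversed list.
lemma sum_eq_foldl (lst : List (List Int)) (h : lst ≠ []) (size : Int) :
    vector_sum lst size =
      lst.reverse.foldl
        (fun partial_ v =>
          (List.range v.length).map
            (fun k => PySem.List.pyGetD v (k : Int) 0 + PySem.List.pyGetD partial_ (k : Int) 0))
        (List.replicate (lst.getLast h).length 0) := by
  induction lst generalizing size with
  | nil => exact absurd rfl h
  | cons v rest ih =>
    cases rest with
    | nil =>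
      show vector_add v (vector_sum [] (v.length : Int)) = _
      simp only [vector_sum, Int.toNat_natCast, List.reverse_singleton,
        List.foldl_cons, List.foldl_nil, List.getLast_singleton]
      rfl
    | cons w rs =>
      have hne : w :: rs ≠ [] := by simp
      show vector_add v (vector_sum (w :: rs) (v.length : Int)) = _
      rw [List.reverse_cons, List.foldl_append, List.getLast_cons hne, ih hne]
      rfl

-- ===== VERDICT (by name: the statement is the Claim_ definition above) =====
theorem vector_sum_spec : Claim_equal_vector_sum := by
  intro lst size _ _
  unfold Spec_vector_sum vector_sum_alt
  by_cases h : lst = []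
  · subst h; simp [vector_sum]
  · rw [if_neg h, sum_eq_foldl lst h size]
    congr 1
    rw [PySem.List.pyGet?_neg_one, List.getLast?_eq_getLast_of_ne_nil h]
    rfl
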